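-- pv_equiv track=rewrite | github.com/columbia/SmartInv | verifier/verify.py | invariants_list
-- ===== SOURCE A (Python) =====
-- def invariants_list(invariants_set):
-- 	line_df = []
-- 	for line in invariants_set.split(';'):
-- 		line_df.append(line)
-- 	invariants = []
-- 	for i in range(len(line_df)-1):
-- 			letter_index = 0
-- 			letter = line_df[i][0]
-- 			line_number = ''
-- 			invariant = ''
-- 			while letter != '+':
-- 				line_number += letter
-- 				letter_index += 1
-- 				if letter_index > (len(line_df[i]) - 1):
-- 					break
-- 				letter = line_df[i][letter_index]
-- 				if letter_index >= 5:
-- 					line_number = ''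
-- 					break
-- 			if letter_index >= 5:
-- 				line_number = ''
-- 				invariant = line_df[i][0:len(line_df[i])]
-- 			else:
-- 				invariant = line_df[i][letter_index+1:len(line_df[i])]
-- 			invariants.append([line_number.replace(" ", ""), invariant])
-- 	return invariants
-- ===== SOURCE B (Python) =====
-- def _parse_segment(s):
--     q = s.find('+')
--     if 0 <= q < 5:
--         return [s[:q].replace(' ', ''), s[q + 1:]]
--     if len(s) >= 5:
--         return ['', s]
--     return [s.replace(' ', ''), '']
--
--
-- def invariants_list(invariants_set):
--     return [_parse_segment(s) for s in invariants_set.split(';')[:-1]]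
-- ===== Notes on version B (the rewrite author's own statement) =====
-- stated objective: simpler
-- what changed: A's bounded character-by-character while-loop with accumulator and break/flag state is replaced by a single find('+') followed by direct slice/branch selection on the segment.
import Mathlib
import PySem

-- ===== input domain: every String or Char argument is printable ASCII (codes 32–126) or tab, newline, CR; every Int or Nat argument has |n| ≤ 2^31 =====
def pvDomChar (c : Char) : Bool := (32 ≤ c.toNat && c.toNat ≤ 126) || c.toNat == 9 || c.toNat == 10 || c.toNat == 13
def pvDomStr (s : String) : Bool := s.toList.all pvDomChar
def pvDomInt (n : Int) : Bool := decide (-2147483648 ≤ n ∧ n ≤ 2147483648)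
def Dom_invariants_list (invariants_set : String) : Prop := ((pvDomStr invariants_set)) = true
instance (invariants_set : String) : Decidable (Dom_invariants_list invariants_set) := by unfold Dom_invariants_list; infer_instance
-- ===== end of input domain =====

-- B replaces A's character-by-character bounded while-loop with a single find('+') and slice/branch decomposition (objective: simpler).

-- ===== PORT A =====
-- A's inner while loop; state (letter_index, letter, line_number); every break returns the pair (letter_index, line_number)
def pvAScan (s : List Char) (letter_index : Nat) (letter : Char) (line_number : List Char) : Nat × List Char :=
  if letter ≠ '+' then
    let line_number' := line_number ++ [letter]
    let li' := letter_index + 1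
    if li' > s.length - 1 then (li', line_number')
    else
      let letter' := s.getD li' ' '
      if 5 ≤ li' then (li', [])       -- Python also clears line_number here; the post-loop test clears it again
      else pvAScan s li' letter' line_number'
  else (letter_index, line_number)
termination_by s.length - letter_index
decreasing_by omega

-- one iteration of A's outer for-loop body, for segment s = line_df[i]
def pvASeg (s : List Char) : List String :=
  let letter := (PySem.List.pyGet? s 0).getD ' '   -- Python raises IndexError on an empty segment: excluded by Pre_
  let r := pvAScan s 0 letter []
  if 5 ≤ r.1 then
    [String.ofList (PySem.Chars.replace [] [' '] []), String.ofList (PySem.Chars.slice s (some 0) (some s.length))]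
  else
    [String.ofList (PySem.Chars.replace r.2 [' '] []), String.ofList (PySem.Chars.slice s (some ((r.1 : Int) + 1)) (some s.length))]

def invariants_list (invariants_set : String) : List (List String) :=
  let line_df := PySem.Chars.splitOn invariants_set.toList [';']
  (PySem.List.pyRange 0 ((line_df.length : Int) - 1) 1).foldl
    (fun invariants i => invariants ++ [pvASeg (PySem.List.pyGetD line_df i [])]) []

-- ===== PORT B =====
def pvParseSegment (s : List Char) : List String :=
  let q := PySem.Chars.find s ['+']
  if 0 ≤ q ∧ q < 5 then
    [String.ofList (PySem.Chars.replace (PySem.Chars.slice s none (some q)) [' '] []),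
     String.ofList (PySem.Chars.slice s (some (q + 1)) none)]
  else if 5 ≤ (s.length : Int) then ["", String.ofList s]
  else [String.ofList (PySem.Chars.replace s [' '] []), ""]

def invariants_list_alt (invariants_set : String) : List (List String) :=
  (PySem.List.slice (PySem.Chars.splitOn invariants_set.toList [';']) none (some (-1))).map pvParseSegment

-- ===== PRECONDITION & SPEC =====
-- Pre_ excludes inputs with an empty non-final ';'-segment (a leading ';' or a ';;'), on which A raises IndexError.
def Pre_invariants_list (invariants_set : String) : Prop :=
  ∀ seg ∈ (PySem.Chars.splitOn invariants_set.toList [';']).dropLast, seg ≠ []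
instance (invariants_set : String) : Decidable (Pre_invariants_list invariants_set) := by unfold Pre_invariants_list; infer_instance

def pvWitness_invariants_list : String := "12 +x>0;y;"

def Spec_invariants_list (invariants_set : String) (out : List (List String)) : Prop := out = invariants_list_alt invariants_set
instance (invariants_set : String) (out : List (List String)) : Decidable (Spec_invariants_list invariants_set out) := by unfold Spec_invariants_list; infer_instance

-- ===== CLAIM (what is proved, stated in full; the proofs are below) =====
def Claim_equal_invariants_list : Prop := ∀ (invariants_set : String), Dom_invariants_list invariants_set → Pre_invariants_list invariants_set → Spec_invariants_list invariants_set (invariants_list invariants_set)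

-- ===== LEMMAS AND PROOFS =====

lemma pvHeadPrefix (c : Char) (l : List Char) : ([c] <+: l) ↔ l.head? = some c := by
  cases l with
  | nil => simp
  | cons a t => simp [List.cons_prefix_cons, eq_comm]

-- singleton-pattern prefix of a drop = that character sits at that index
lemma pvSinglePrefix (c : Char) (s : List Char) (k : Nat) :
    ([c] <+: s.drop k) ↔ (k < s.length ∧ s.getD k ' ' = c) := by
  rw [pvHeadPrefix, List.head?_drop]
  constructor
  · intro h
    have hk : k < s.length := (List.getElem?_eq_some_iff.mp h).1
    refine ⟨hk, ?_⟩
    simp [List.getD_eq_getElem?_getD, h]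
  · rintro ⟨hk, hc⟩
    rw [List.getElem?_eq_getElem hk]
    rw [List.getD_eq_getElem?_getD, List.getElem?_eq_getElem hk] at hc
    simpa using hc

-- find's characterisation for the pattern ['+']
lemma pvFindPos (s : List Char) (h : 0 ≤ PySem.Chars.find s ['+']) :
    (PySem.Chars.find s ['+']).toNat < s.length ∧
    s.getD (PySem.Chars.find s ['+']).toNat ' ' = '+' ∧
    ∀ i < (PySem.Chars.find s ['+']).toNat, s.getD i ' ' ≠ '+' := by
  obtain ⟨h1, h2⟩ := PySem.Chars.find_spec h
  rw [pvSinglePrefix] at h1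
  refine ⟨h1.1, h1.2, ?_⟩
  intro i hi hc
  exact h2 i hi ((pvSinglePrefix '+' s i).mpr ⟨by omega, hc⟩)

lemma pvFindEq (s : List Char) (k : Nat) (hk : k < s.length) (hc : s.getD k ' ' = '+')
    (hprev : ∀ i < k, s.getD i ' ' ≠ '+') : PySem.Chars.find s ['+'] = k := by
  have hg : ('+' : Char) :: s.drop (k + 1) = s.drop k := by
    have h1 : s[k] = '+' := by
      rw [List.getD_eq_getElem?_getD, List.getElem?_eq_getElem hk] at hc
      simpa using hc
    rw [← h1]
    exact List.getElem_cons_drop hk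
  have hpos : 0 ≤ PySem.Chars.find s ['+'] := by
    rw [PySem.Chars.find_nonneg_iff]
    refine ⟨s.take k, s.drop (k + 1), ?_⟩
    rw [List.append_assoc]
    change s.take k ++ ('+' :: s.drop (k + 1)) = s
    rw [hg, List.take_append_drop]
  obtain ⟨hlt, hq, hmin⟩ := pvFindPos s hpos
  have h1 : ¬ (PySem.Chars.find s ['+']).toNat < k := fun hl => hprev _ hl hq
  have h2 : ¬ k < (PySem.Chars.find s ['+']).toNat := fun hl => hmin k hl hc
  omega

lemma pvFindNone (s : List Char) (h : ∀ i < s.length, s.getD i ' ' ≠ '+') :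
    PySem.Chars.find s ['+'] = -1 := by
  rw [PySem.Chars.find_eq_neg_one_iff]
  rintro ⟨t, u, htu⟩
  have hget : s[t.length]? = some '+' := by
    rw [← htu, List.append_assoc, List.getElem?_append_right (le_refl _)]
    simp
  have hk : t.length < s.length := (List.getElem?_eq_some_iff.mp hget).1
  exact h t.length hk (by simp [List.getD_eq_getElem?_getD, hget])

-- closed form of A's scan result
def pvScanRes (s : List Char) : Nat × List Char :=
  let q := PySem.Chars.find s ['+']
  if 0 ≤ q ∧ q < 5 then (q.toNat, s.take q.toNat)
  else if s.length ≤ 5 then (s.length, s)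
  else (5, [])

lemma pvScanStep (li : Nat) (s : List Char) (hlt : li < s.length) (hle : li ≤ 4)
    (hprev : ∀ i < li, s.getD i ' ' ≠ '+')
    (ih : li < 4 → ∀ t : List Char, li + 1 < t.length → (∀ i < li + 1, t.getD i ' ' ≠ '+') →
      pvAScan t (li + 1) (t.getD (li + 1) ' ') (t.take (li + 1)) = pvScanRes t) :
    pvAScan s li (s.getD li ' ') (s.take li) = pvScanRes s := by
  have hcg : s.getD li ' ' = s[li] := by
    rw [List.getD_eq_getElem?_getD, List.getElem?_eq_getElem hlt]; rfl
  by_cases hc : s.getD li ' ' = '+'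
  · have hq : PySem.Chars.find s ['+'] = (li : Int) := pvFindEq s li hlt hc hprev
    rw [pvAScan, if_neg (by simpa using hc)]
    unfold pvScanRes
    rw [hq, if_pos (by constructor <;> omega)]
    simp
  · have htake : s.take li ++ [s.getD li ' '] = s.take (li + 1) := by
      rw [hcg, List.take_add_one, List.getElem?_eq_getElem hlt]
      rfl
    rw [pvAScan, if_pos hc]
    simp only []
    by_cases hb : li + 1 > s.length - 1
    · have hlen : s.length = li + 1 := by omega
      rw [if_pos hb]
      have hall : ∀ i < s.length, s.getD i ' ' ≠ '+' := by
        intro i hi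
        rcases Nat.lt_or_ge i li with h | h
        · exact hprev i h
        · have : i = li := by omega
          rw [this]; exact hc
      have hq := pvFindNone s hall
      unfold pvScanRes
      rw [hq, if_neg (by intro h; omega), if_pos (by omega)]
      rw [htake]
      have ht : s.take (li + 1) = s := by rw [← hlen]; exact List.take_length
      rw [ht, hlen]
    · rw [if_neg hb]
      have hlt' : li + 1 < s.length := by omega
      have hprev' : ∀ i < li + 1, s.getD i ' ' ≠ '+' := by
        intro i hi
        rcases Nat.lt_or_ge i li with h | h
        · exact hprev i h
        · have : i = li := by omega
          rw [this]; exact hc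
      by_cases h5 : 5 ≤ li + 1
      · rw [if_pos h5]
        have hli : li = 4 := by omega
        have hnq : ¬ (0 ≤ PySem.Chars.find s ['+'] ∧ PySem.Chars.find s ['+'] < 5) := by
          rintro ⟨h0, hlt5⟩
          obtain ⟨_, hq, _⟩ := pvFindPos s h0
          exact hprev' (PySem.Chars.find s ['+']).toNat (by omega) hq
        unfold pvScanRes
        rw [if_neg hnq, if_neg (by omega)]
        simp [hli]
      · rw [if_neg h5]
        rw [htake]
        exact ih (by omega) s hlt' hprev'

lemma pvAScan_spec : ∀ (f li : Nat), li + f = 4 → ∀ (s : List Char), li < s.length →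
    (∀ i < li, s.getD i ' ' ≠ '+') →
    pvAScan s li (s.getD li ' ') (s.take li) = pvScanRes s := by
  intro f
  induction f with
  | zero =>
    intro li hli s hlt hprev
    exact pvScanStep li s hlt (by omega) hprev (by omega)
  | succ f ih =>
    intro li hli s hlt hprev
    exact pvScanStep li s hlt (by omega) hprev
      (fun _ t hlt' hprev' => ih (li + 1) (by omega) t hlt' hprev')

lemma pvSeg_eq (s : List Char) (h : s ≠ []) : pvASeg s = pvParseSegment s := by
  have hlen : 0 < s.length := List.length_pos_iff.mpr h
  have hscan := pvAScan_spec 4 0 rfl s hlen (by intro i hi; omega)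
  simp only [List.take_zero] at hscan
  have hget : (PySem.List.pyGet? s 0).getD ' ' = s.getD 0 ' ' := by
    rw [show (0 : Int) = ((0 : Nat) : Int) from rfl, PySem.List.pyGet?_natCast]
    rfl
  simp only [pvASeg, pvParseSegment]
  rw [hget, hscan]
  by_cases hq : 0 ≤ PySem.Chars.find s ['+'] ∧ PySem.Chars.find s ['+'] < 5
  · obtain ⟨hq0, hq5⟩ := hq
    obtain ⟨hqlt, _, _⟩ := pvFindPos s hq0
    have hres : pvScanRes s = ((PySem.Chars.find s ['+']).toNat, s.take (PySem.Chars.find s ['+']).toNat) := by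
      unfold pvScanRes
      rw [if_pos ⟨hq0, hq5⟩]
    rw [hres]
    dsimp only
    rw [if_neg (by omega : ¬ 5 ≤ (PySem.Chars.find s ['+']).toNat), if_pos ⟨hq0, hq5⟩]
    have e1 : PySem.Chars.slice s none (some (PySem.Chars.find s ['+'])) =
        s.take (PySem.Chars.find s ['+']).toNat := by
      rw [PySem.Chars.slice_eq_listSlice, PySem.List.slice_to s hq0]
    have e2 : PySem.Chars.slice s (some (((PySem.Chars.find s ['+']).toNat : Int) + 1)) (some (s.length : Int)) =
        s.drop ((PySem.Chars.find s ['+']).toNat + 1) := by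
      rw [PySem.Chars.slice_eq_listSlice]
      rw [show ((((PySem.Chars.find s ['+']).toNat : Int)) + 1) = (((PySem.Chars.find s ['+']).toNat + 1 : Nat) : Int) by push_cast; ring]
      rw [PySem.List.slice_natCast s]
      exact List.take_of_length_le (by simp)
    have e3 : PySem.Chars.slice s (some (PySem.Chars.find s ['+'] + 1)) none =
        s.drop ((PySem.Chars.find s ['+']).toNat + 1) := by
      rw [PySem.Chars.slice_eq_listSlice, PySem.List.slice_from s (by omega)]
      congr 1
      omega
    rw [e1, e2, e3]
  · by_cases hl : s.length ≤ 5
    · have hres : pvScanRes s = (s.length, s) := by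
        unfold pvScanRes
        rw [if_neg hq, if_pos hl]
      rw [hres]
      dsimp only
      by_cases h5 : s.length = 5
      · rw [if_pos (by omega), if_neg hq, if_pos (by omega : (5 : Int) ≤ (s.length : Int))]
        have e4 : PySem.Chars.slice s (some 0) (some (s.length : Int)) = s := by
          rw [PySem.Chars.slice_eq_listSlice, PySem.List.slice_zero_start,
            PySem.List.slice_to s (by omega)]
          simp
        rw [e4]
        rfl
      · rw [if_neg (by omega), if_neg hq, if_neg (by omega : ¬ (5 : Int) ≤ (s.length : Int))]
        have e5 : PySem.Chars.slice s (some ((s.length : Int) + 1)) (some (s.length : Int)) = [] := by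
          rw [PySem.Chars.slice_eq_listSlice]
          rw [show ((s.length : Int) + 1) = ((s.length + 1 : Nat) : Int) by push_cast; ring]
          rw [PySem.List.slice_natCast s]
          simp
        rw [e5]
    · have hres : pvScanRes s = (5, []) := by
        unfold pvScanRes
        rw [if_neg hq, if_neg hl]
      rw [hres]
      dsimp only
      rw [if_pos (le_refl 5), if_neg hq, if_pos (by omega : (5 : Int) ≤ (s.length : Int))]
      have e4 : PySem.Chars.slice s (some 0) (some (s.length : Int)) = s := by
        rw [PySem.Chars.slice_eq_listSlice, PySem.List.slice_zero_start,
          PySem.List.slice_to s (by omega)]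
        simp
      rw [e4]
      rfl

-- ===== VERDICT (by name: the statement is the Claim_ definition above) =====
theorem invariants_list_spec : Claim_equal_invariants_list := by
  intro inv _hdom hpre
  unfold Spec_invariants_list invariants_list invariants_list_alt
  simp only []
  set L := PySem.Chars.splitOn inv.toList [';'] with hL
  rw [PySem.List.slice_to_neg_one]
  rcases Nat.eq_zero_or_pos L.length with hn | hn
  · rw [show ((L.length : Int) - 1) = -1 by omega, PySem.List.pyRange_one_eq_nil (by omega)]
    have : L = [] := List.length_eq_zero_iff.mp hn
    simp [this]
  · have hrange : ((L.length : Int) - 1) = ((L.dropLast.length : Nat) : Int) := by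
      rw [List.length_dropLast]; omega
    rw [hrange]
    have hcongr := PySem.List.foldl_congr_mem
      (PySem.List.pyRange 0 ((L.dropLast.length : Nat) : Int) 1)
      (fun invariants i => invariants ++ [pvASeg (PySem.List.pyGetD L i [])])
      (fun invariants i => invariants ++ [pvASeg (PySem.List.pyGetD L.dropLast i [])])
      []
      (by
        intro acc i hi
        show acc ++ [pvASeg (PySem.List.pyGetD L i [])] = acc ++ [pvASeg (PySem.List.pyGetD L.dropLast i [])]
        rw [PySem.List.mem_pyRange_one] at hi
        have h0 : i = ((i.toNat : Nat) : Int) := by omega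
        have hilt : i.toNat < L.dropLast.length := by
          rw [List.length_dropLast]; omega
        rw [h0, PySem.List.pyGetD_natCast, PySem.List.pyGetD_natCast]
        rw [List.getD_eq_getElem?_getD, List.getD_eq_getElem?_getD,
          List.getElem?_eq_getElem hilt,
          List.getElem?_eq_getElem (by rw [List.length_dropLast] at hilt; omega : i.toNat < L.length)]
        rw [List.getElem_dropLast])
    rw [hcongr]
    rw [PySem.List.foldl_pyRange_zero_pyGetD' L.dropLast [] (fun acc seg => acc ++ [pvASeg seg]) []]
    rw [PySem.List.foldl_append_singleton_eq_map]
    rw [List.nil_append]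
    exact List.map_congr_left (fun seg hseg => pvSeg_eq seg (hpre seg hseg))
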